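-- pv_equiv track=rewrite | github.com/zhangyl4/EyeWO | estp_gen/ego4d/video_caption_scene.py | segment_video
-- ===== SOURCE A (Python) =====
-- def segment_video(anomaly_frames, total_frames, window_len = 10, min_anomalies = 4):
--     # 将异常帧列表去重并排序
--     anomaly_frames = sorted(set(anomaly_frames))
--     # 创建候选帧列表，包括0,所有异常帧,和total_frames
--     candidate_frames = sorted(set([0] + anomaly_frames + [total_frames]))
--     segments = []
--     i = 0
--     n = len(candidate_frames)
--     while i < n:
--         start = candidate_frames[i]
--         end = start
--         # 尝试扩展end到下一个候选帧，直到满足条件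
--         j = i + 1
--         while j < n:
--             end = candidate_frames[j]
--             # 计算分段长度
--             length = end - start + 1
--             # 计算内部异常帧数量
--             anomalies_in_segment = sum(1 for frame in anomaly_frames if start <= frame <= end)
--             # 检查是否满足条件
--             if length > window_len or anomalies_in_segment >= min_anomalies:
--                 # 记录这个分段
--                 segments.append((start, end))
--                 i = j
--                 break
--             j += 1
--         else:
--             if start < total_frames:
--                 segments.append((start, total_frames))
--             break
--     return segments
-- ===== SOURCE B (Python) =====
-- def segment_video(anomaly_frames, total_frames, window_len=10, min_anomalies=4):
--     # One forward pass: two running pointers into the sorted anomaly list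
--     # replace A's full rescan of anomaly_frames at every candidate end.
--     a = sorted(set(anomaly_frames))
--     cand = sorted(set([0] + a + [total_frames]))
--     n = len(cand)
--     m = len(a)
--     segments = []
--     start = cand[0]
--     lo = 0                      # number of anomalies strictly below start
--     while lo < m and a[lo] < start:
--         lo += 1
--     p = lo                      # number of anomalies <= current end
--     j = 1
--     while j < n:
--         end = cand[j]
--         while p < m and a[p] <= end:
--             p += 1
--         if end - start + 1 > window_len or p - lo >= min_anomalies:
--             segments.append((start, end))
--             start = end
--             while lo < m and a[lo] < end:
--                 lo += 1
--         j += 1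
--     if start < total_frames:
--         segments.append((start, total_frames))
--     return segments
-- ===== Notes on version B (the rewrite author's own statement) =====
-- stated objective: faster
-- what changed: Replaces A's nested rescan of all anomaly frames for every candidate segment end by a single forward pass over the candidate frames with two monotone pointers into the sorted anomaly list (counts below start and up to end), so the per-end O(m) count becomes amortized O(1).
import Mathlib
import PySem

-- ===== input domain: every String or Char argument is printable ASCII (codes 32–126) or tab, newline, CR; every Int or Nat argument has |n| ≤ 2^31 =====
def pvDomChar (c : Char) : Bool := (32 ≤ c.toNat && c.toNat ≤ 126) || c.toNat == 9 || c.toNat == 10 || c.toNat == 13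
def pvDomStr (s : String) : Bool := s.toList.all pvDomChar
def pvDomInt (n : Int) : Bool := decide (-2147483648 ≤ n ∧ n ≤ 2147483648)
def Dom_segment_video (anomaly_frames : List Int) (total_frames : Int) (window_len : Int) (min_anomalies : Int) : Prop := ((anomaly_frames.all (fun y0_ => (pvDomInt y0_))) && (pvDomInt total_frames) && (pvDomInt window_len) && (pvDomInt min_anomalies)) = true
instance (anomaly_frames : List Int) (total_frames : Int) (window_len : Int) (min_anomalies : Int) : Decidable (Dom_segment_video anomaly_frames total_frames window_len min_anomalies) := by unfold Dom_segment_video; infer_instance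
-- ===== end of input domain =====

-- B replaces A's rescan of all anomaly frames at every candidate segment end by one
-- forward pass with two monotone pointers into the sorted anomaly list (objective: faster).

-- ===== PORT A =====
-- All while-loops below are ported with an explicit iteration-count argument ('fuel')
-- always called with enough fuel for the loop bound, so each port computes exactly
-- what its Python loop computes.

-- sum(1 for frame in anomaly_frames if start <= frame <= end)
def pvCountA (a : List Int) (s e : Int) : Int :=
  a.foldl (fun acc f => if s ≤ f ∧ f ≤ e then acc + 1 else acc) 0

-- inner 'while j < n' loop: first j (scanning upward) whose candidate closes a segment
def pvInnerA (cand a : List Int) (wl ma start : Int) : Nat → Nat → Option (Nat × Int)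
  | 0, _ => none
  | fuel + 1, j =>
    if h : j < cand.length then
      let e := cand[j]
      if e - start + 1 > wl ∨ pvCountA a start e ≥ ma then some (j, e)
      else pvInnerA cand a wl ma start fuel (j + 1)
    else none

-- outer 'while i < n' loop
def pvOuterA (cand a : List Int) (total wl ma : Int) :
    Nat → Nat → List (Int × Int) → List (Int × Int)
  | 0, _, segs => segs
  | fuel + 1, i, segs =>
    if h : i < cand.length then
      let start := cand[i]
      match pvInnerA cand a wl ma start cand.length (i + 1) with
      | some (j, e) => pvOuterA cand a total wl ma fuel j (segs ++ [(start, e)])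
      | none => if start < total then segs ++ [(start, total)] else segs
    else segs

def segment_video (anomaly_frames : List Int) (total_frames : Int) (window_len : Int) (min_anomalies : Int) : List (Int × Int) :=
  let a := PySem.List.sorted (PySem.Set.ofList anomaly_frames) (fun x => x) false
  let cand := PySem.List.sorted (PySem.Set.ofList (0 :: (a ++ [total_frames]))) (fun x => x) false
  pvOuterA cand a total_frames window_len min_anomalies cand.length 0 []

-- ===== PORT B =====
-- 'while lo < m and a[lo] < x: lo += 1'
def pvAdvLt (a : List Int) (x : Int) : Nat → Nat → Nat
  | 0, lo => lo
  | fuel + 1, lo =>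
    if h : lo < a.length then
      if a[lo] < x then pvAdvLt a x fuel (lo + 1) else lo
    else lo

-- 'while p < m and a[p] <= x: p += 1'
def pvAdvLe (a : List Int) (x : Int) : Nat → Nat → Nat
  | 0, p => p
  | fuel + 1, p =>
    if h : p < a.length then
      if a[p] ≤ x then pvAdvLe a x fuel (p + 1) else p
    else p

-- the single 'while j < n' pass; returns (segments, final start)
def pvLoopB (cand a : List Int) (wl ma : Int) :
    Nat → Nat → Int → Nat → Nat → List (Int × Int) → List (Int × Int) × Int
  | 0, _, start, _, _, segs => (segs, start)
  | fuel + 1, j, start, lo, p, segs =>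
    if h : j < cand.length then
      let e := cand[j]
      let p' := pvAdvLe a e a.length p
      if e - start + 1 > wl ∨ (p' : Int) - (lo : Int) ≥ ma then
        pvLoopB cand a wl ma fuel (j + 1) e (pvAdvLt a e a.length lo) p' (segs ++ [(start, e)])
      else
        pvLoopB cand a wl ma fuel (j + 1) start lo p' segs
    else (segs, start)

def segment_video_alt (anomaly_frames : List Int) (total_frames : Int) (window_len : Int) (min_anomalies : Int) : List (Int × Int) :=
  let a := PySem.List.sorted (PySem.Set.ofList anomaly_frames) (fun x => x) false
  let cand := PySem.List.sorted (PySem.Set.ofList (0 :: (a ++ [total_frames]))) (fun x => x) false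
  let start0 := cand.headI          -- cand[0]; cand is never empty (it contains 0)
  let lo0 := pvAdvLt a start0 a.length 0
  let r := pvLoopB cand a window_len min_anomalies cand.length 1 start0 lo0 lo0 []
  if r.2 < total_frames then r.1 ++ [(r.2, total_frames)] else r.1

-- ===== PRECONDITION & SPEC =====
def Spec_segment_video (anomaly_frames : List Int) (total_frames : Int) (window_len : Int) (min_anomalies : Int) (out : List (Int × Int)) : Prop := out = segment_video_alt anomaly_frames total_frames window_len min_anomalies
instance (anomaly_frames : List Int) (total_frames : Int) (window_len : Int) (min_anomalies : Int) (out : List (Int × Int)) : Decidable (Spec_segment_video anomaly_frames total_frames window_len min_anomalies out) := by unfold Spec_segment_video; infer_instance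

-- ===== CLAIM (what is proved, stated in full; the proofs are below) =====
def Claim_equal_segment_video : Prop := ∀ (anomaly_frames : List Int) (total_frames : Int) (window_len : Int) (min_anomalies : Int), Dom_segment_video anomaly_frames total_frames window_len min_anomalies → Spec_segment_video anomaly_frames total_frames window_len min_anomalies (segment_video anomaly_frames total_frames window_len min_anomalies)

-- ===== LEMMAS AND PROOFS =====

-- number of anomalies strictly below x / at most x
def cntLt (a : List Int) (x : Int) : Nat := a.countP (fun f => decide (f < x))
def cntLe (a : List Int) (x : Int) : Nat := a.countP (fun f => decide (f ≤ x))

-- on a strictly sorted list, a downward-closed predicate holds exactly on a prefix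
theorem countP_sorted_iff (p : Int → Bool) (a : List Int) (hs : a.Pairwise (· < ·))
    (hdc : ∀ x y : Int, x ≤ y → p y = true → p x = true) :
    ∀ k (hk : k < a.length), (p a[k] = true ↔ k < a.countP p) := by
  induction a with
  | nil => intro k hk; simp at hk
  | cons hd tl ih =>
      rcases List.pairwise_cons.mp hs with ⟨hhd, htl⟩
      intro k hk
      rw [List.countP_cons]
      cases k with
      | zero =>
          simp only [List.getElem_cons_zero]
          constructor
          · intro h; split <;> omega
          · intro h
            by_contra hph
            have h0 : tl.countP p = 0 := by
              rw [List.countP_eq_zero]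
              intro y hy hpy
              exact absurd (hdc hd y (le_of_lt (hhd y hy)) hpy) (by simpa using hph)
            simp [h0, Bool.eq_false_iff.mpr hph] at h
      | succ k =>
          simp only [List.getElem_cons_succ]
          have hk' : k < tl.length := by simpa using hk
          rw [ih htl k hk']
          by_cases hp : p tl[k] = true
          · have hphd : p hd = true := hdc hd tl[k] (le_of_lt (hhd _ (tl.getElem_mem hk'))) hp
            simp only [hphd, if_true]
            constructor <;> intro h <;> omega
          · have h1 : ¬ k < tl.countP p := fun hcon => hp ((ih htl k hk').mpr hcon)
            have h2 : (if p hd = true then 1 else 0) ≤ 1 := by split <;> omega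
            constructor
            · intro h; exact absurd h h1
            · intro h; omega

theorem getElem_lt_iff_cntLt (a : List Int) (hs : a.Pairwise (· < ·)) (x : Int)
    (k : Nat) (hk : k < a.length) : a[k] < x ↔ k < cntLt a x := by
  have := countP_sorted_iff (fun f => decide (f < x)) a hs
    (by intro u v huv h; simp at h ⊢; omega) k hk
  simpa [cntLt] using this

theorem getElem_le_iff_cntLe (a : List Int) (hs : a.Pairwise (· < ·)) (x : Int)
    (k : Nat) (hk : k < a.length) : a[k] ≤ x ↔ k < cntLe a x := by
  have := countP_sorted_iff (fun f => decide (f ≤ x)) a hs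
    (by intro u v huv h; simp at h ⊢; omega) k hk
  simpa [cntLe] using this

theorem cntLt_le_length (a : List Int) (x : Int) : cntLt a x ≤ a.length :=
  List.countP_le_length

theorem cntLe_le_length (a : List Int) (x : Int) : cntLe a x ≤ a.length :=
  List.countP_le_length

theorem cntLt_le_cntLe (a : List Int) (x : Int) : cntLt a x ≤ cntLe a x :=
  List.countP_mono_left (by intro f _ h; simp at h ⊢; omega)

theorem cntLe_mono (a : List Int) {x y : Int} (h : x ≤ y) : cntLe a x ≤ cntLe a y :=
  List.countP_mono_left (by intro f _ hf; simp at hf ⊢; omega)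

theorem cntLt_mono (a : List Int) {x y : Int} (h : x ≤ y) : cntLt a x ≤ cntLt a y :=
  List.countP_mono_left (by intro f _ hf; simp at hf ⊢; omega)

theorem pvAdvLt_eq (a : List Int) (hs : a.Pairwise (· < ·)) (x : Int) :
    ∀ fuel lo, lo ≤ cntLt a x → cntLt a x ≤ lo + fuel → pvAdvLt a x fuel lo = cntLt a x := by
  intro fuel
  induction fuel with
  | zero => intro lo h1 h2; rw [pvAdvLt]; omega
  | succ fuel ih =>
      intro lo h1 h2
      rw [pvAdvLt]
      split
      · next hl =>
          split
          · next hx =>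
              have := (getElem_lt_iff_cntLt a hs x lo hl).mp hx
              exact ih (lo + 1) (by omega) (by omega)
          · next hx =>
              have := (getElem_lt_iff_cntLt a hs x lo hl).not.mp hx
              omega
      · next hl =>
          have := cntLt_le_length a x
          omega

theorem pvAdvLe_eq (a : List Int) (hs : a.Pairwise (· < ·)) (x : Int) :
    ∀ fuel p, p ≤ cntLe a x → cntLe a x ≤ p + fuel → pvAdvLe a x fuel p = cntLe a x := by
  intro fuel
  induction fuel with
  | zero => intro p h1 h2; rw [pvAdvLe]; omega
  | succ fuel ih =>
      intro p h1 h2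
      rw [pvAdvLe]
      split
      · next hl =>
          split
          · next hx =>
              have := (getElem_le_iff_cntLe a hs x p hl).mp hx
              exact ih (p + 1) (by omega) (by omega)
          · next hx =>
              have := (getElem_le_iff_cntLe a hs x p hl).not.mp hx
              omega
      · next hl =>
          have := cntLe_le_length a x
          omega

-- A's windowed anomaly count as a difference of the two prefix counts
theorem foldl_count (a : List Int) (s e : Int) :
    ∀ acc : Int, a.foldl (fun acc f => if s ≤ f ∧ f ≤ e then acc + 1 else acc) acc
      = acc + (a.countP (fun f => decide (s ≤ f ∧ f ≤ e)) : Int) := by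
  induction a with
  | nil => intro acc; simp
  | cons hd tl ih =>
      intro acc
      simp only [List.foldl_cons]
      rw [ih]
      by_cases h : s ≤ hd ∧ hd ≤ e <;> simp [h] <;> push_cast <;> ring

theorem countP_window_split (a : List Int) (s e : Int) (hse : s ≤ e) :
    a.countP (fun f => decide (s ≤ f ∧ f ≤ e)) + cntLt a s = cntLe a e := by
  induction a with
  | nil => simp [cntLt, cntLe]
  | cons hd tl ih =>
      simp only [cntLt, cntLe, List.countP_cons] at ih ⊢
      have : (if (decide (s ≤ hd ∧ hd ≤ e)) = true then 1 else 0)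
           + (if (decide (hd < s)) = true then 1 else 0)
           = (if (decide (hd ≤ e)) = true then (1:Nat) else 0) := by
        by_cases h1 : s ≤ hd <;> by_cases h2 : hd ≤ e <;> simp [h1, h2] <;> omega
      omega

theorem pvCountA_eq (a : List Int) (s e : Int) (hse : s ≤ e) :
    pvCountA a s e = (cntLe a e : Int) - (cntLt a s : Int) := by
  have h := countP_window_split a s e hse
  unfold pvCountA
  rw [foldl_count a s e 0]
  omega

-- cand is strictly increasing, so indices order its values
theorem cand_getElem_lt (cand : List Int) (hc : cand.Pairwise (· < ·)) {i j : Nat}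
    (hij : i < j) (hj : j < cand.length) : cand[i]'(by omega) < cand[j] :=
  (List.pairwise_iff_getElem.mp hc) i j (by omega) hj hij

-- MAIN: from any aligned position, A's inner-scan continuation equals B's single pass
theorem pv_main (cand a : List Int) (hc : cand.Pairwise (· < ·)) (hs : a.Pairwise (· < ·))
    (total wl ma : Int) :
    ∀ m i j p₀ segs fI fA fB (hij : i < j) (hjn : j ≤ cand.length)
      (hm : cand.length - j ≤ m) (hfI : cand.length - j ≤ fI)
      (hfA : cand.length - j ≤ fA) (hfB : cand.length - j ≤ fB)
      (hp : ∀ hj : j < cand.length, p₀ ≤ cntLe a cand[j]),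
    (match pvInnerA cand a wl ma (cand[i]'(by omega)) fI j with
      | some (_j, e) => pvOuterA cand a total wl ma fA _j (segs ++ [(cand[i]'(by omega), e)])
      | none => if cand[i]'(by omega) < total then segs ++ [(cand[i]'(by omega), total)] else segs)
    = (let r := pvLoopB cand a wl ma fB j (cand[i]'(by omega)) (cntLt a (cand[i]'(by omega))) p₀ segs
       if r.2 < total then r.1 ++ [(r.2, total)] else r.1) := by
  intro m
  induction m with
  | zero =>
      intro i j p₀ segs fI fA fB hij hjn hm hfI hfA hfB hp
      have hjl : ¬ j < cand.length := by omega
      have hInner : pvInnerA cand a wl ma (cand[i]'(by omega)) fI j = none := by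
        cases fI with
        | zero => rw [pvInnerA]
        | succ f => rw [pvInnerA, dif_neg hjl]
      have hLoop : pvLoopB cand a wl ma fB j (cand[i]'(by omega))
          (cntLt a (cand[i]'(by omega))) p₀ segs = (segs, cand[i]'(by omega)) := by
        cases fB with
        | zero => rw [pvLoopB]
        | succ f => rw [pvLoopB, dif_neg hjl]
      simp only [hInner, hLoop]
  | succ m ih =>
      intro i j p₀ segs fI fA fB hij hjn hm hfI hfA hfB hp
      by_cases hjl : j < cand.length
      · have hi : i < cand.length := by omega
        obtain ⟨fI', rfl⟩ : ∃ f, fI = f + 1 := ⟨fI - 1, by omega⟩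
        obtain ⟨fB', rfl⟩ : ∃ f, fB = f + 1 := ⟨fB - 1, by omega⟩
        have hse : cand[i] < cand[j] := cand_getElem_lt cand hc hij hjl
        have hple : p₀ ≤ cntLe a cand[j] := hp hjl
        have hadv : pvAdvLe a (cand[j]) a.length p₀ = cntLe a (cand[j]) :=
          pvAdvLe_eq a hs _ a.length p₀ hple (by have := cntLe_le_length a (cand[j]); omega)
        have hcond : (pvCountA a (cand[i]) (cand[j]) ≥ ma)
            ↔ ((pvAdvLe a (cand[j]) a.length p₀ : Int) - (cntLt a (cand[i]) : Int) ≥ ma) := by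
          rw [hadv, pvCountA_eq a _ _ (le_of_lt hse)]
        by_cases hfire : cand[j] - cand[i] + 1 > wl ∨ pvCountA a (cand[i]) (cand[j]) ≥ ma
        · have hfire' : cand[j] - cand[i] + 1 > wl
              ∨ (pvAdvLe a (cand[j]) a.length p₀ : Int) - (cntLt a (cand[i]) : Int) ≥ ma := by
            rcases hfire with h | h
            · exact Or.inl h
            · exact Or.inr (hcond.mp h)
          have hInner : pvInnerA cand a wl ma (cand[i]) (fI' + 1) j = some (j, cand[j]) := by
            rw [pvInnerA, dif_pos hjl]
            exact if_pos hfire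
          have hLoop : pvLoopB cand a wl ma (fB' + 1) j (cand[i]) (cntLt a (cand[i])) p₀ segs
              = pvLoopB cand a wl ma fB' (j + 1) (cand[j]) (pvAdvLt a (cand[j]) a.length (cntLt a (cand[i])))
                  (pvAdvLe a (cand[j]) a.length p₀) (segs ++ [(cand[i], cand[j])]) := by
            rw [pvLoopB, dif_pos hjl]
            exact if_pos hfire'
          simp only [hInner, hLoop]
          -- A continues the outer loop from j; B continues the pass at j+1 with new start
          obtain ⟨fA', rfl⟩ : ∃ f, fA = f + 1 := ⟨fA - 1, by omega⟩
          rw [pvOuterA, dif_pos hjl]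
          have hlt : pvAdvLt a (cand[j]) a.length (cntLt a (cand[i])) = cntLt a (cand[j]) :=
            pvAdvLt_eq a hs _ a.length _ (cntLt_mono a (le_of_lt hse))
              (by have := cntLt_le_length a (cand[j]); omega)
          rw [hlt, hadv]
          exact ih j (j + 1) (cntLe a (cand[j])) (segs ++ [(cand[i], cand[j])])
            cand.length fA' fB'
            (by omega) (by omega) (by omega) (by omega) (by omega) (by omega)
            (fun hj1 => cntLe_mono a (le_of_lt (cand_getElem_lt cand hc (by omega) hj1)))
        · have hfire' : ¬ (cand[j] - cand[i] + 1 > wl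
              ∨ (pvAdvLe a (cand[j]) a.length p₀ : Int) - (cntLt a (cand[i]) : Int) ≥ ma) := by
            intro h
            rcases h with h | h
            · exact hfire (Or.inl h)
            · exact hfire (Or.inr (hcond.mpr h))
          have hInner : pvInnerA cand a wl ma (cand[i]) (fI' + 1) j
              = pvInnerA cand a wl ma (cand[i]) fI' (j + 1) := by
            rw [pvInnerA, dif_pos hjl]
            exact if_neg hfire
          have hLoop : pvLoopB cand a wl ma (fB' + 1) j (cand[i]) (cntLt a (cand[i])) p₀ segs
              = pvLoopB cand a wl ma fB' (j + 1) (cand[i]) (cntLt a (cand[i]))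
                  (pvAdvLe a (cand[j]) a.length p₀) segs := by
            rw [pvLoopB, dif_pos hjl]
            exact if_neg hfire'
          simp only [hInner, hLoop, hadv]
          exact ih i (j + 1) (cntLe a (cand[j])) segs fI' fA fB'
            (by omega) (by omega) (by omega) (by omega) (by omega) (by omega)
            (fun hj1 => cntLe_mono a (le_of_lt (cand_getElem_lt cand hc (by omega) hj1)))
      · have hInner : pvInnerA cand a wl ma (cand[i]'(by omega)) fI j = none := by
          cases fI with
          | zero => rw [pvInnerA]
          | succ f => rw [pvInnerA, dif_neg hjl]
        have hLoop : pvLoopB cand a wl ma fB j (cand[i]'(by omega))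
            (cntLt a (cand[i]'(by omega))) p₀ segs = (segs, cand[i]'(by omega)) := by
          cases fB with
          | zero => rw [pvLoopB]
          | succ f => rw [pvLoopB, dif_neg hjl]
        simp only [hInner, hLoop]

-- cand is nonempty (0 is among the candidates)
theorem cand_ne_nil (a : List Int) (tf : Int) :
    PySem.List.sorted (PySem.Set.ofList (0 :: (a ++ [tf]))) (fun x => x) false ≠ [] := by
  intro h
  rw [PySem.List.sorted_eq_nil_iff] at h
  have : (0 : Int) ∈ PySem.Set.ofList (0 :: (a ++ [tf])) := by
    rw [PySem.Set.mem_ofList]; simp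
  rw [h] at this
  simp at this

theorem headI_eq_getElem_zero (l : List Int) (h0 : 0 < l.length) : l.headI = l[0] := by
  cases l with
  | nil => simp at h0
  | cons x xs => rfl

-- the two ports agree for any strictly sorted cand/a (instantiated with the real ones below)
theorem pv_top (cand a : List Int) (hc : cand.Pairwise (· < ·)) (hs : a.Pairwise (· < ·))
    (h0 : 0 < cand.length) (tf wl ma : Int) :
    pvOuterA cand a tf wl ma cand.length 0 [] =
      (let start0 := cand.headI
       let lo0 := pvAdvLt a start0 a.length 0
       let r := pvLoopB cand a wl ma cand.length 1 start0 lo0 lo0 []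
       if r.2 < tf then r.1 ++ [(r.2, tf)] else r.1) := by
  have hhead : cand.headI = cand[0] := headI_eq_getElem_zero cand h0
  simp only [hhead]
  have hlo0 : pvAdvLt a (cand[0]) a.length 0 = cntLt a (cand[0]) :=
    pvAdvLt_eq a hs _ a.length 0 (Nat.zero_le _)
      (by have := cntLt_le_length a (cand[0]); omega)
  obtain ⟨n', hn⟩ : ∃ f, cand.length = f + 1 := ⟨cand.length - 1, by omega⟩
  rw [hn, pvOuterA, dif_pos (by omega : 0 < cand.length), hlo0]
  have := pv_main cand a hc hs tf wl ma cand.length 0 1 (cntLt a (cand[0])) []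
    cand.length n' (n' + 1)
    (by omega) (by omega) (by omega) (by omega) (by omega) (by omega)
    (fun hj1 => le_trans (cntLt_le_cntLe a _)
      (cntLe_mono a (le_of_lt (cand_getElem_lt cand hc (by omega) hj1))))
  exact this

-- ===== VERDICT (by name: the statement is the Claim_ definition above) =====
theorem segment_video_spec : Claim_equal_segment_video := by
  intro af tf wl ma _hdom
  unfold Spec_segment_video segment_video segment_video_alt
  exact pv_top _ _
    (PySem.List.sorted_ofList_pairwise_lt _)
    (PySem.List.sorted_ofList_pairwise_lt af)
    (List.length_pos_iff.mpr (cand_ne_nil (PySem.List.sorted (PySem.Set.ofList af) (fun x => x) false) tf))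
    tf wl ma
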